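-- pv_equiv track=rewrite | github.com/GroundUpCoder/c-compiler | tests/run.py | first_tu
-- ===== SOURCE A (Python) =====
-- def first_tu(text):
--     lines = text.split("\n")
--     result = []
--     count = 0
--     for line in lines:
--         if line.startswith("Translation Unit"):
--             count += 1
--             if count > 1:
--                 break
--         if count == 1:
--             result.append(line)
--     return "\n".join(result)
-- ===== SOURCE B (Python) =====
-- def first_tu(text):
--     lines = text.split("\n")
--     start = next((i for i, line in enumerate(lines) if line.startswith("Translation Unit")), None)
--     if start is None:
--         return ""
--     end = next((i for i in range(start + 1, len(lines)) if lines[i].startswith("Translation Unit")), len(lines))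
--     return "\n".join(lines[start:end])
-- ===== Notes on version B (the rewrite author's own statement) =====
-- stated objective: simpler
-- what changed: Replaces the single accumulating pass with a count flag by finding the index of the first 'Translation Unit' header, finding the index of the next header, and joining the slice between them.
import Mathlib
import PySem

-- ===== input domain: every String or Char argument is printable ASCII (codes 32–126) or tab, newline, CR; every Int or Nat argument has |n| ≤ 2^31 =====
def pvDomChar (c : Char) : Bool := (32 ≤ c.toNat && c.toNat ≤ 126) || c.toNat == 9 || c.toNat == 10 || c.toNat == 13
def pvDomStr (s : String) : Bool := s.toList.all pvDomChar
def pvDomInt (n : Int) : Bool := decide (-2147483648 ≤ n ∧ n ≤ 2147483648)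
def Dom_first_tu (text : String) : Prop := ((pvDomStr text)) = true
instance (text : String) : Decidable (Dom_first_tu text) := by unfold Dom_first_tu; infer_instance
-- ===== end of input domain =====

-- B replaces A's accumulating pass with a count flag by a find-start / find-end / slice decomposition (same return value; no speed claim).

-- ===== PORT A =====
-- the `line.startswith("Translation Unit")` test, shared literally by both ports
def pvIsTU (l : String) : Bool := PySem.Str.startswith l "Translation Unit"

-- text.split("\n"): the separator is nonempty, so Str.split? is always `some`; shared by both ports
def pvLines (text : String) : List String := (PySem.Str.split? text "\n").getD []

-- A's for-loop with `result`/`count` state and the `break` on the second header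
def firstTuGo : List String → List String → Nat → List String
  | [], result, _ => result
  | line :: rest, result, count =>
    if pvIsTU line then
      if count + 1 > 1 then result
      else firstTuGo rest (if count + 1 = 1 then result ++ [line] else result) (count + 1)
    else firstTuGo rest (if count = 1 then result ++ [line] else result) count

def first_tu (text : String) : String :=
  PySem.Str.join "\n" (firstTuGo (pvLines text) [] 0)

-- ===== PORT B =====
-- B's body: find the first header index, find the next header index after it, join the slice
def first_tu_alt (text : String) : String :=
  let lines := pvLines text
  match lines.findIdx? pvIsTU with
  | none => ""
  | some start =>
      let stop : Nat :=
        match (lines.drop (start + 1)).findIdx? pvIsTU with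
        | none => lines.length
        | some j => start + 1 + j
      PySem.Str.join "\n" (PySem.List.slice lines (some (Int.ofNat start)) (some (Int.ofNat stop)))

-- ===== PRECONDITION & SPEC =====
def Spec_first_tu (text : String) (out : String) : Prop := out = first_tu_alt text
instance (text : String) (out : String) : Decidable (Spec_first_tu text out) := by unfold Spec_first_tu; infer_instance

-- ===== CLAIM (what is proved, stated in full; the proofs are below) =====
def Claim_equal_first_tu : Prop := ∀ (text : String), Dom_first_tu text → Spec_first_tu text (first_tu text)

-- ===== LEMMAS AND PROOFS =====

-- A with count = 1 collects lines up to (excluding) the next header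
theorem firstTuGo_one (ls : List String) (res : List String) :
    firstTuGo ls res 1 = res ++ ls.takeWhile (fun l => !pvIsTU l) := by
  induction ls generalizing res with
  | nil => simp [firstTuGo]
  | cons l rest ih =>
    by_cases h : pvIsTU l = true
    · simp [firstTuGo, h]
    · simp only [Bool.not_eq_true] at h
      simp [firstTuGo, h, ih]

theorem takeWhile_len_take {α : Type} (p : α → Bool) (ls : List α) :
    ls.take ((ls.takeWhile p).length) = ls.takeWhile p :=
  (List.prefix_iff_eq_take.mp (List.takeWhile_prefix p)).symm

-- A with count = 0 skips to the first header, then A collects the header and the following non-header lines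
theorem firstTuGo_zero (ls : List String) (res : List String) :
    firstTuGo ls res 0 =
      res ++ (match ls.findIdx? pvIsTU with
              | none => []
              | some s => (ls.drop s).take (1 + ((ls.drop (s + 1)).takeWhile (fun l => !pvIsTU l)).length)) := by
  induction ls generalizing res with
  | nil => simp [firstTuGo]
  | cons l rest ih =>
    by_cases h : pvIsTU l = true
    · rw [List.findIdx?_cons]
      simp only [h]
      simp only [firstTuGo, h, if_true]
      simp only [Nat.zero_add]
      rw [firstTuGo_one]
      have h1 : List.drop 1 (l :: rest) = rest := rfl
      have h0 : List.drop 0 (l :: rest) = l :: rest := rfl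
      rw [h1, h0, Nat.add_comm, List.take_succ_cons, takeWhile_len_take]
      simp
    · simp only [Bool.not_eq_true] at h
      rw [List.findIdx?_cons]
      simp only [h]
      simp only [firstTuGo, h, Bool.false_eq_true, if_false, ih]
      rw [if_neg (by omega)]
      cases hf : rest.findIdx? pvIsTU with
      | none => simp
      | some s => simp [List.drop_succ_cons]

-- findIdx? = some j means: j lines before the first header, hence takeWhile of the negation has length j
theorem findIdx?_some_takeWhile {α : Type} (p : α → Bool) (ls : List α) (j : Nat)
    (h : ls.findIdx? p = some j) : ((ls.takeWhile (fun x => !p x)).length = j) ∧ j < ls.length := by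
  induction ls generalizing j with
  | nil => simp at h
  | cons x xs ih =>
    rw [List.findIdx?_cons] at h
    by_cases hx : p x = true
    · simp [hx] at h
      subst h
      simp [hx]
    · simp only [Bool.not_eq_true] at hx
      simp [hx] at h
      obtain ⟨j', hj', hj⟩ := h
      subst hj
      obtain ⟨h1, h2⟩ := ih j' hj'
      simp [hx, h1, Nat.succ_lt_succ h2]

theorem findIdx?_none_takeWhile {α : Type} (p : α → Bool) (ls : List α)
    (h : ls.findIdx? p = none) : ls.takeWhile (fun x => !p x) = ls := by
  rw [List.takeWhile_eq_self_iff]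
  intro x hx
  have := List.findIdx?_eq_none_iff.mp h x hx
  simp [this]

-- ===== VERDICT (by name: the statement is the Claim_ definition above) =====
theorem first_tu_spec : Claim_equal_first_tu := by
  intro text _
  unfold Spec_first_tu first_tu first_tu_alt
  rw [firstTuGo_zero]
  simp only [Int.ofNat_eq_natCast]
  cases hf : (pvLines text).findIdx? pvIsTU with
  | none => rfl
  | some s =>
    simp only [List.nil_append]
    rw [PySem.List.slice_natCast]
    have hs : s < (pvLines text).length := (findIdx?_some_takeWhile pvIsTU _ s hf).2
    congr 2
    cases hg : ((pvLines text).drop (s + 1)).findIdx? pvIsTU with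
    | none =>
      rw [findIdx?_none_takeWhile pvIsTU _ hg, List.length_drop]
      show 1 + ((pvLines text).length - (s + 1)) = (pvLines text).length - s
      omega
    | some j =>
      rw [(findIdx?_some_takeWhile pvIsTU _ j hg).1]
      show 1 + j = s + 1 + j - s
      omega
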